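-- pv_equiv track=rewrite | github.com/answerIII/GraphTheory2022-2023 | all_info_dataset.py | BFS
-- ===== SOURCE A (Python) =====
-- from collections import deque
--
-- def BFS(node, adjacency_list):
--     visited = set()
--     queue = deque()
--     queue.append(node)
--     visited.add(node)
--     dist = 1
--     while len(queue) > 0 and dist < 3:
--         size = len(queue)
--         while size > 0:
--             cur = queue.popleft()
--             size -= 1
--             for neighbour in adjacency_list[cur]:
--                 if (neighbour not in visited):
--                     queue.append(neighbour)
--                     visited.add(neighbour)
--         dist += 1
--     return list(queue)
-- ===== SOURCE B (Python) =====
-- def BFS(node, adjacency_list):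
--     # Unrolled depth-2 BFS: two explicit level passes instead of a deque loop.
--     visited = {node}
--     frontier1 = []
--     for v in adjacency_list[node]:
--         if v not in visited:
--             visited.add(v)
--             frontier1.append(v)
--     frontier2 = []
--     for u in frontier1:
--         for v in adjacency_list[u]:
--             if v not in visited:
--                 visited.add(v)
--                 frontier2.append(v)
--     return frontier2
-- ===== Notes on version B (the rewrite author's own statement) =====
-- stated objective: simpler
-- what changed: Replaced the deque/dist/size BFS machinery with the fixed depth bound unrolled into two explicit level passes that build frontier lists directly.
import Mathlib
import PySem

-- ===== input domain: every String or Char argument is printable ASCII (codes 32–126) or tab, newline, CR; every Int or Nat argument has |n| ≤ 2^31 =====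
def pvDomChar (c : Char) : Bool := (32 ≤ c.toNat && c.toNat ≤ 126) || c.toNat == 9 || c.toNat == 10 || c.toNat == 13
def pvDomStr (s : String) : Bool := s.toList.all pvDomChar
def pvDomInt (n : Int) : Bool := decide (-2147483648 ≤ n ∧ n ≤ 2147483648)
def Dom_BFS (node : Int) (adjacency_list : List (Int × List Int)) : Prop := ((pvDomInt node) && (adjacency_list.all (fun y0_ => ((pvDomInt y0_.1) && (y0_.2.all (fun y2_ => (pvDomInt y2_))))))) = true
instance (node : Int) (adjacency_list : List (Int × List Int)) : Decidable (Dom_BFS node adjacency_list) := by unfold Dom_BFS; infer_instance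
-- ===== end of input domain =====

-- B unrolls the fixed depth bound (dist < 3) into two explicit level passes, dropping the deque, the dist counter and the inner size loop (objective: simpler).


-- dict lookup adjacency_list[k] (first matching key; Pre_ guarantees the key exists, so the [] default is never taken on admitted inputs)
def adjGet (adjacency_list : List (Int × List Int)) (k : Int) : List Int :=
  ((adjacency_list.find? (fun p => p.1 == k)).map (·.2)).getD []

-- ===== PORT A =====
-- inner 'while size > 0' loop: pop `size` nodes off the queue, appending unvisited neighbours
def BFS_inner (adjacency_list : List (Int × List Int)) :
    Nat → List Int → PySem.Set Int → List Int × PySem.Set Int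
  | 0, queue, visited => (queue, visited)
  | size + 1, queue, visited =>
    match queue with
    | [] => ([], visited)   -- unreachable: size never exceeds the queue length
    | cur :: rest =>
      let st := (adjGet adjacency_list cur).foldl
        (fun (st : List Int × PySem.Set Int) neighbour =>
          if PySem.Set.contains st.2 neighbour then st
          else (st.1 ++ [neighbour], PySem.Set.add st.2 neighbour)) (rest, visited)
      BFS_inner adjacency_list size st.1 st.2

-- outer 'while len(queue) > 0 and dist < 3' loop
def BFS_outer (adjacency_list : List (Int × List Int))
    (queue : List Int) (visited : PySem.Set Int) (dist : Nat) : List Int :=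
  if queue.length > 0 ∧ dist < 3 then
    let st := BFS_inner adjacency_list queue.length queue visited
    BFS_outer adjacency_list st.1 st.2 (dist + 1)
  else queue
termination_by 3 - dist
decreasing_by omega

def BFS (node : Int) (adjacency_list : List (Int × List Int)) : List Int :=
  BFS_outer adjacency_list [node] (PySem.Set.add PySem.Set.empty node) 1

-- ===== PORT B =====
def BFS_alt (node : Int) (adjacency_list : List (Int × List Int)) : List Int :=
  let v0 : PySem.Set Int := PySem.Set.add PySem.Set.empty node
  let s1 := (adjGet adjacency_list node).foldl
    (fun (st : List Int × PySem.Set Int) v =>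
      if PySem.Set.contains st.2 v then st
      else (st.1 ++ [v], PySem.Set.add st.2 v)) ([], v0)
  let s2 := s1.1.foldl
    (fun (st : List Int × PySem.Set Int) u =>
      (adjGet adjacency_list u).foldl
        (fun (st : List Int × PySem.Set Int) v =>
          if PySem.Set.contains st.2 v then st
          else (st.1 ++ [v], PySem.Set.add st.2 v)) st)
    ([], s1.2)
  s2.1

-- ===== PRECONDITION & SPEC =====
-- Pre_ excludes exactly the inputs where A raises KeyError: the start node, or a neighbour of it
-- (other than the start node itself) reached in the first pass, is missing from the dict.
def Pre_BFS (node : Int) (adjacency_list : List (Int × List Int)) : Prop :=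
  (adjacency_list.find? (fun p => p.1 == node)).isSome ∧
  ∀ v ∈ adjGet adjacency_list node, v ≠ node →
    (adjacency_list.find? (fun p => p.1 == v)).isSome
instance (node : Int) (adjacency_list : List (Int × List Int)) : Decidable (Pre_BFS node adjacency_list) := by unfold Pre_BFS; infer_instance

def pvWitness_BFS : Int × (List (Int × List Int)) := (0, [(0, [1, 2]), (1, [2, 3]), (2, [0]), (3, [])])

def Spec_BFS (node : Int) (adjacency_list : List (Int × List Int)) (out : List Int) : Prop := out = BFS_alt node adjacency_list
instance (node : Int) (adjacency_list : List (Int × List Int)) (out : List Int) : Decidable (Spec_BFS node adjacency_list out) := by unfold Spec_BFS; infer_instance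

-- ===== CLAIM (what is proved, stated in full; the proofs are below) =====
def Claim_equal_BFS : Prop := ∀ (node : Int) (adjacency_list : List (Int × List Int)), Dom_BFS node adjacency_list → Pre_BFS node adjacency_list → Spec_BFS node adjacency_list (BFS node adjacency_list)

-- ===== LEMMAS AND PROOFS =====

-- the per-neighbour step both ports use, and B's per-node (level) step
def nstep (st : List Int × PySem.Set Int) (v : Int) : List Int × PySem.Set Int :=
  if PySem.Set.contains st.2 v then st else (st.1 ++ [v], PySem.Set.add st.2 v)

def lstep (adjacency_list : List (Int × List Int))
    (st : List Int × PySem.Set Int) (u : Int) : List Int × PySem.Set Int :=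
  (adjGet adjacency_list u).foldl nstep st

-- the neighbour fold only appends on the right, so a prefix of the list component passes through
theorem nfold_prepend (ns : List Int) : ∀ (pre acc : List Int) (v : PySem.Set Int),
    ns.foldl nstep (pre ++ acc, v) =
      (pre ++ (ns.foldl nstep (acc, v)).1, (ns.foldl nstep (acc, v)).2) := by
  induction ns with
  | nil => intro pre acc v; rfl
  | cons n ns ih =>
    intro pre acc v
    simp only [List.foldl_cons, nstep]
    split_ifs with h
    · exact ih pre acc v
    · rw [List.append_assoc]; exact ih pre (acc ++ [n]) (PySem.Set.add v n)

-- A's inner loop popping exactly `q.length` nodes is B's fold over the snapshot q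
theorem inner_eq_fold (adjacency_list : List (Int × List Int)) (q : List Int) :
    ∀ (extra : List Int) (v : PySem.Set Int),
    BFS_inner adjacency_list q.length (q ++ extra) v = q.foldl (lstep adjacency_list) (extra, v) := by
  induction q with
  | nil => intro extra v; rfl
  | cons u q ih =>
    intro extra v
    simp only [List.length_cons, List.cons_append, BFS_inner, List.foldl_cons]
    have e : (fun (st : List Int × PySem.Set Int) (neighbour : Int) =>
        if PySem.Set.contains st.2 neighbour then st
        else (st.1 ++ [neighbour], PySem.Set.add st.2 neighbour)) = nstep := rfl
    have h : ((adjGet adjacency_list u).foldl nstep (q ++ extra, v)) =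
        (q ++ (lstep adjacency_list (extra, v) u).1, (lstep adjacency_list (extra, v) u).2) := by
      simpa [lstep] using nfold_prepend (adjGet adjacency_list u) q extra v
    rw [e, h, ih]

-- B's program text is the fold of lstep over the two levels
theorem alt_eq (node : Int) (adjacency_list : List (Int × List Int)) :
    BFS_alt node adjacency_list =
      ((lstep adjacency_list ([], PySem.Set.add PySem.Set.empty node) node).1.foldl
        (lstep adjacency_list)
        ([], (lstep adjacency_list ([], PySem.Set.add PySem.Set.empty node) node).2)).1 := rfl

-- ===== VERDICT (by name: the statement is the Claim_ definition above) =====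
theorem BFS_spec : Claim_equal_BFS := by
  intro node adjacency_list _ _
  unfold Spec_BFS BFS
  rw [alt_eq, BFS_outer, if_pos (by simp)]
  have h1 : BFS_inner adjacency_list [node].length [node] (PySem.Set.add PySem.Set.empty node) =
      lstep adjacency_list ([], PySem.Set.add PySem.Set.empty node) node := by
    simpa using inner_eq_fold adjacency_list [node] [] (PySem.Set.add PySem.Set.empty node)
  rw [h1]
  have hp : ∀ (p : List Int × PySem.Set Int),
      BFS_outer adjacency_list p.1 p.2 (1 + 1) = (p.1.foldl (lstep adjacency_list) ([], p.2)).1 := by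
    intro p
    rw [BFS_outer]
    by_cases hq : p.1.length > 0
    · rw [if_pos ⟨hq, by omega⟩]
      have h2 : BFS_inner adjacency_list p.1.length p.1 p.2 =
          p.1.foldl (lstep adjacency_list) ([], p.2) := by
        simpa using inner_eq_fold adjacency_list p.1 [] p.2
      rw [h2, BFS_outer, if_neg (by omega)]
    · rw [if_neg (fun h => hq h.1)]
      have : p.1 = [] := List.length_eq_zero_iff.mp (by omega)
      rw [this]
      rfl
  exact hp _
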